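-- pv_equiv track=rewrite | github.com/mboogn/cowtools | itertools_recipes.py | nth_combination
-- ===== SOURCE A (Python) =====
-- def nth_combination(iterable, r, index):
--     'Equivalent to list(combinations(iterable, r))[index]'
--     pool = tuple(iterable)
--     n = len(pool)
--     if r < 0 or r > n:
--         raise ValueError
--     c = 1
--     k = min(r, n-r)
--     for i in range(1, k+1):
--         c = c * (n - k + i) // i
--     if index < 0:
--         index += c
--     if index < 0 or index >= c:
--         raise IndexError
--     result = []
--     while r:
--         c, n, r = c*r//n, n-1, r-1
--         while index >= c:
--             index -= c
--             c, n = c*(n-r)//n, n-1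
--         result.append(pool[-1-n])
--     return tuple(result)
-- ===== SOURCE B (Python) =====
-- def nth_combination(iterable, r, index):
--     'Equivalent to list(combinations(iterable, r))[index]'
--     pool = tuple(iterable)
--     n = len(pool)
--     if r < 0 or r > n:
--         raise ValueError
--     fact = [1]
--     for i in range(1, n + 1):
--         fact.append(fact[-1] * i)
--
--     def comb(a, b):
--         # binomial coefficient from the factorial table; 0 when b is out of range
--         if b < 0 or b > a:
--             return 0
--         return fact[a] // (fact[b] * fact[a - b])
--
--     total = comb(n, r)
--     if index < 0:
--         index += total
--     if index < 0 or index >= total: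
--         raise IndexError
--     result = []
--     k = r
--     start = 0
--     while k:
--         j = start
--         count = comb(n - 1 - j, k - 1)
--         while index >= count:
--             index -= count
--             j += 1
--             count = comb(n - 1 - j, k - 1)
--         result.append(pool[j])
--         start = j + 1
--         k = k - 1
--     return tuple(result)
-- ===== Notes on version B (the rewrite author's own statement) =====
-- stated objective: alternative
-- what changed: B unranks front-to-back over absolute candidate positions, recomputing each count with a factorial-based binomial helper, instead of A's single incrementally-updated coefficient and backward pool[-1-n] indexing.
import Mathlib
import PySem

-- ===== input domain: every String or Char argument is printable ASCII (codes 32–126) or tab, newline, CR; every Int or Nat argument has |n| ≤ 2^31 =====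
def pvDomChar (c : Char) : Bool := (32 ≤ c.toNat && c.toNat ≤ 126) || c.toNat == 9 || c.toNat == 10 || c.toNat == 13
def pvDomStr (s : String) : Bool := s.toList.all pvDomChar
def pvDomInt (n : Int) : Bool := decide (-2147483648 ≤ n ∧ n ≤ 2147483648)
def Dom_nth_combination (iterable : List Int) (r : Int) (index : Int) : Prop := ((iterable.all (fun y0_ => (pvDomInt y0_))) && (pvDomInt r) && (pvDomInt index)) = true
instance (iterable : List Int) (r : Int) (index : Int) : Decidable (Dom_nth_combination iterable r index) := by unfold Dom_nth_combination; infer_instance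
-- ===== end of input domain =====

-- B re-implements the unranking front-to-back with directly computed (factorial-based) binomial
-- coefficients instead of A's backward pool indexing and incrementally maintained coefficient;
-- objective: alternative decomposition (same asymptotic cost).

-- ===== PORT A =====

-- the 'for i in range(1, k+1): c = c * (n - k + i) // i' loop of A
def chooseLoopA (n k : Int) : Int :=
  (PySem.List.pyRange 1 (k + 1) 1).foldl
    (fun c i => PySem.Int.floordiv (c * (n - k + i)) i) 1

-- A's inner 'while index >= c' loop; fuel bounds the iteration count (Python loops unboundedly,
-- inside Pre_ the fuel supplied by outerA always suffices)
def innerA : Nat → Int → Int → Int → Int → Int × Int × Int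
  | 0, c, n, _, index => (c, n, index)
  | fuel+1, c, n, r, index =>
    if c ≤ index then
      innerA fuel (PySem.Int.floordiv (c * (n - r)) n) (n - 1) r (index - c)
    else (c, n, index)

-- A's outer 'while r' loop
def outerA : Nat → Int → Int → Int → Int → List Int → List Int → List Int
  | 0, _, _, _, _, _, result => result
  | fuel+1, c, n, r, index, pool, result =>
    if r = 0 then result
    else
      let c1 := PySem.Int.floordiv (c * r) n
      let n1 := n - 1
      let r1 := r - 1
      match innerA n1.toNat c1 n1 r1 index with
      | (c2, n2, index2) =>
          outerA fuel c2 n2 r1 index2 pool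
            (result ++ [(PySem.List.pyGet? pool (-1 - n2)).getD 0])

def nth_combination (iterable : List Int) (r : Int) (index : Int) : List Int :=
  let pool := iterable
  let n : Int := pool.length
  if r < 0 ∨ n < r then []          -- Python raises ValueError (outside Pre_)
  else
    let k := min r (n - r)
    let c := chooseLoopA n k
    let index1 := if index < 0 then index + c else index
    if index1 < 0 ∨ c ≤ index1 then []   -- Python raises IndexError (outside Pre_)
    else outerA r.toNat c n r index1 pool []

-- ===== PORT B =====

-- B's factorial table: fact = [1]; for i in range(1, n+1): fact.append(fact[-1] * i)
def factTableB (n : Int) : List Int :=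
  (PySem.List.pyRange 1 (n + 1) 1).foldl
    (fun acc i => acc ++ [PySem.List.pyGetD acc (-1) 0 * i]) [1]

-- B's nested helper comb, reading the factorial table
def combT (fact : List Int) (a b : Int) : Int :=
  if b < 0 ∨ a < b then 0
  else PySem.Int.floordiv (PySem.List.pyGetD fact a 0)
        (PySem.List.pyGetD fact b 0 * PySem.List.pyGetD fact (a - b) 0)

-- B's inner scan 'while index >= count' over candidate positions j; fuel as in innerA
def innerB : Nat → List Int → Int → Int → Int → Int → Int × Int
  | 0, _, _, j, _, index => (j, index)
  | fuel+1, fact, n, j, k, index =>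
    let count := combT fact (n - 1 - j) (k - 1)
    if count ≤ index then innerB fuel fact n (j + 1) k (index - count)
    else (j, index)

-- B's outer 'while k' loop
def outerB : Nat → List Int → Int → Int → Int → Int → List Int → List Int → List Int
  | 0, _, _, _, _, _, _, result => result
  | fuel+1, fact, n, start, k, index, pool, result =>
    if k = 0 then result
    else
      match innerB (n - start).toNat fact n start k index with
      | (j, index2) =>
          outerB fuel fact n (j + 1) (k - 1) index2 pool
            (result ++ [(PySem.List.pyGet? pool j).getD 0])

def nth_combination_alt (iterable : List Int) (r : Int) (index : Int) : List Int :=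
  let pool := iterable
  let n : Int := pool.length
  if r < 0 ∨ n < r then []          -- Python raises ValueError (outside Pre_)
  else
    let fact := factTableB n
    let total := combT fact n r
    let index1 := if index < 0 then index + total else index
    if index1 < 0 ∨ total ≤ index1 then []   -- Python raises IndexError (outside Pre_)
    else outerB r.toNat fact n 0 r index1 pool []

-- ===== PRECONDITION & SPEC =====
-- Pre_ excludes exactly the inputs where A raises: ValueError when r < 0 or r > len(iterable),
-- IndexError when the (negatively normalised) index is outside [0, C(n, r)).
def Pre_nth_combination (iterable : List Int) (r : Int) (index : Int) : Prop :=
  0 ≤ r ∧ r ≤ (iterable.length : Int) ∧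
  -((iterable.length.choose r.toNat : Nat) : Int) ≤ index ∧
  index < ((iterable.length.choose r.toNat : Nat) : Int)
instance (iterable : List Int) (r : Int) (index : Int) : Decidable (Pre_nth_combination iterable r index) := by
  unfold Pre_nth_combination; infer_instance

def pvWitness_nth_combination : List Int × Int × Int := ([10, 20, 30, 40], 2, 3)

def Spec_nth_combination (iterable : List Int) (r : Int) (index : Int) (out : List Int) : Prop := out = nth_combination_alt iterable r index
instance (iterable : List Int) (r : Int) (index : Int) (out : List Int) : Decidable (Spec_nth_combination iterable r index out) := by unfold Spec_nth_combination; infer_instance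

-- ===== CLAIM (what is proved, stated in full; the proofs are below) =====
def Claim_equal_nth_combination : Prop := ∀ (iterable : List Int) (r : Int) (index : Int), Dom_nth_combination iterable r index → Pre_nth_combination iterable r index → Spec_nth_combination iterable r index (nth_combination iterable r index)

-- ===== LEMMAS AND PROOFS =====

-- A's incremental coefficient loop computes a binomial coefficient
lemma chooseLoop_aux (dn : Nat) : ∀ (j : Nat),
    (PySem.List.pyRange 1 ((j : Int) + 1) 1).foldl
      (fun c i => PySem.Int.floordiv (c * ((dn : Int) + i)) i) 1
    = (((dn + j).choose j : Nat) : Int) := by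
  intro j
  induction j with
  | zero => simp [PySem.List.pyRange_one_eq_nil (by omega : (1:Int) ≥ 1)]
  | succ j ih =>
      have hb : (((j+1 : Nat) : Int)) + 1 = ((j : Int) + 1) + 1 := by push_cast; ring
      rw [hb, PySem.List.pyRange_one_succ_right (by omega : (1:Int) ≤ (j:Int) + 1),
          List.foldl_append]
      simp only [List.foldl_cons, List.foldl_nil]
      rw [ih]
      have hid : (dn + j).choose j * (dn + j + 1) = (dn + j + 1).choose (j + 1) * (j + 1) := by
        have h2 := Nat.succ_mul_choose_eq (dn + j) j
        simp only [Nat.succ_eq_add_one] at h2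
        rw [← h2, mul_comm]
      have hc : (((dn + j).choose j : Nat) : Int) * ((dn : Int) + ((j : Int) + 1))
          = (((dn + j + 1).choose (j + 1) * (j + 1) : Nat) : Int) := by
        exact_mod_cast congrArg (Nat.cast (R := Int)) hid
      rw [hc, show ((j:Int) + 1) = ((j + 1 : Nat) : Int) by push_cast; ring,
          PySem.Int.floordiv_natCast, Nat.mul_div_cancel _ (by omega)]
      have ha : dn + (j + 1) = dn + j + 1 := by omega
      rw [ha]

lemma chooseLoopA_eq (m r : Nat) (h : r ≤ m) :
    chooseLoopA (m : Int) (min (r : Int) ((m : Int) - (r : Int))) = ((m.choose r : Nat) : Int) := by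
  unfold chooseLoopA
  rcases le_total (r : Int) ((m : Int) - (r : Int)) with hle | hle
  · rw [min_eq_left hle]
    have hd : (m : Int) - (r : Int) = ((m - r : Nat) : Int) := by omega
    simp only [hd]
    rw [chooseLoop_aux (m - r) r, Nat.sub_add_cancel h]
  · rw [min_eq_right hle]
    have hk : (m : Int) - (r : Int) = ((m - r : Nat) : Int) := by omega
    rw [hk]
    have hd : (m : Int) - ((m - r : Nat) : Int) = ((r : Nat) : Int) := by omega
    simp only [hd]
    rw [chooseLoop_aux r (m - r), show r + (m - r) = m by omega, Nat.choose_symm h]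

-- taking fact[-1] of the factorial table read front of a map over a range
lemma table_last (n : Nat) :
    PySem.List.pyGetD ((List.range (n+1)).map (fun i => ((i.factorial : Nat) : Int))) (-1) 0
      = ((n.factorial : Nat) : Int) := by
  simp only [PySem.List.pyGetD, PySem.List.pyGet?, PySem.List.pyIdx?, List.length_map,
    List.length_range]
  rw [if_neg (by omega : ¬ ((0:Int) ≤ -1)), if_pos (by push_cast; omega : -((n+1 : Nat) : Int) ≤ -1)]
  rw [show n + 1 - (-(-1 : Int)).toNat = n by omega]
  have hget : ((List.range (n+1)).map (fun i => ((i.factorial : Nat) : Int)))[n]?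
      = some ((n.factorial : Nat) : Int) := by
    rw [List.getElem?_map, List.getElem?_range (by omega : n < n + 1)]
    rfl
  simp [hget]

-- the factorial table holds the factorials 0! … n!
lemma factTable_eq (n : Nat) :
    factTableB (n : Int) = (List.range (n+1)).map (fun i => ((i.factorial : Nat) : Int)) := by
  induction n with
  | zero =>
      simp [factTableB, PySem.List.pyRange_one_eq_nil (by omega : (1:Int) ≥ 1), List.range_one]
  | succ n ih =>
      unfold factTableB at *
      rw [show (((n+1 : Nat) : Int)) + 1 = ((n : Int) + 1) + 1 by push_cast; ring,
          PySem.List.pyRange_one_succ_right (by omega : (1:Int) ≤ (n:Int) + 1),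
          List.foldl_append]
      simp only [List.foldl_cons, List.foldl_nil]
      rw [ih, table_last n]
      rw [show n + 1 + 1 = (n + 1) + 1 from rfl, List.range_succ (n := n + 1), List.map_append]
      congr 1
      simp only [List.map_cons, List.map_nil]
      congr 1
      push_cast [Nat.factorial_succ]
      ring

lemma factTable_get (n i : Nat) (h : i ≤ n) :
    PySem.List.pyGetD (factTableB (n : Int)) ((i : Nat) : Int) 0 = ((i.factorial : Nat) : Int) := by
  rw [factTable_eq, PySem.List.pyGetD_natCast]
  rw [List.getD_eq_getElem?_getD, List.getElem?_map, List.getElem?_range (by omega : i < n + 1)]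
  rfl

lemma combT_eq (n a b : Nat) (ha : a ≤ n) (hb : b ≤ a) :
    combT (factTableB (n : Int)) (a : Int) (b : Int) = ((a.choose b : Nat) : Int) := by
  unfold combT
  rw [if_neg (by omega : ¬((b : Int) < 0 ∨ (a : Int) < (b : Int)))]
  rw [show (a : Int) - (b : Int) = ((a - b : Nat) : Int) by omega]
  rw [factTable_get n a ha, factTable_get n b (by omega), factTable_get n (a - b) (by omega)]
  rw [show ((b.factorial : Nat) : Int) * (((a - b).factorial : Nat) : Int)
        = ((b.factorial * (a - b).factorial : Nat) : Int) by push_cast; ring]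
  rw [PySem.Int.floordiv_natCast]
  congr 1
  have hid := Nat.choose_mul_factorial_mul_factorial hb
  rw [mul_assoc] at hid
  rw [← hid, Nat.mul_div_cancel _ (by positivity)]

-- the exact floor division A performs at the head of its outer loop
lemma divA1 (m k : Nat) (h : k + 1 ≤ m) :
    PySem.Int.floordiv (((m.choose (k+1) : Nat) : Int) * ((k : Int) + 1)) (m : Int)
    = (((m-1).choose k : Nat) : Int) := by
  have h2 := Nat.succ_mul_choose_eq (m - 1) k
  simp only [Nat.succ_eq_add_one, show m - 1 + 1 = m by omega] at h2
  have hid : m.choose (k+1) * (k+1) = (m-1).choose k * m := by rw [← h2, mul_comm]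
  have hc : ((m.choose (k+1) : Nat) : Int) * ((k : Int) + 1)
      = (((m-1).choose k * m : Nat) : Int) := by
    exact_mod_cast congrArg (Nat.cast (R := Int)) hid
  rw [hc, PySem.Int.floordiv_natCast, Nat.mul_div_cancel _ (by omega : 0 < m)]

-- the exact floor division A performs inside its inner loop
lemma divA2 (p k : Nat) (h : k + 1 ≤ p) :
    PySem.Int.floordiv (((p.choose k : Nat) : Int) * ((p : Int) - (k : Int))) (p : Int)
    = (((p-1).choose k : Nat) : Int) := by
  have h2 := Nat.choose_mul_succ_eq (p - 1) k
  rw [show p - 1 + 1 = p by omega] at h2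
  have hid : p.choose k * (p - k) = (p-1).choose k * p := h2.symm
  have hc : ((p.choose k : Nat) : Int) * ((p : Int) - (k : Int))
      = (((p-1).choose k * p : Nat) : Int) := by
    rw [show (p : Int) - (k : Int) = ((p - k : Nat) : Int) by omega]
    exact_mod_cast congrArg (Nat.cast (R := Int)) hid
  rw [hc, PySem.Int.floordiv_natCast, Nat.mul_div_cancel _ (by omega : 0 < p)]

-- joint characterisation of the two inner skip loops
lemma inner_agree : ∀ (m : Nat), ∀ (k idx fa fb L : Nat) (j : Int),
    k + 1 ≤ m → idx < m.choose (k+1) → m ≤ fa + 1 → m ≤ fb → 0 ≤ j →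
    (L : Int) - j = (m : Int) →
    ∃ s i2 : Nat, s + (k+1) ≤ m ∧ i2 < (m-1-s).choose k ∧
      innerA fa (((m-1).choose k : Nat) : Int) ((m : Int) - 1) (k : Int) (idx : Int)
        = ((((m-1-s).choose k : Nat) : Int), ((m-1-s : Nat) : Int), (i2 : Int)) ∧
      innerB fb (factTableB (L : Int)) (L : Int) j ((k : Int) + 1) (idx : Int)
        = (j + (s : Int), (i2 : Int)) := by
  intro m
  induction m using Nat.strong_induction_on with
  | _ m IH =>
    intro k idx fa fb L j hk hidx hfa hfb hj0 hnj
    by_cases hlt : idx < (m-1).choose k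
    · refine ⟨0, idx, by omega, by simpa using hlt, ?_, ?_⟩
      · rw [show m - 1 - 0 = m - 1 by omega,
            show ((m - 1 : Nat) : Int) = (m : Int) - 1 by omega]
        cases fa with
        | zero => simp [innerA]
        | succ f =>
            simp only [innerA]
            rw [if_neg (by exact_mod_cast Nat.not_le.2 hlt)]
      · obtain ⟨g, rfl⟩ : ∃ g, fb = g + 1 := ⟨fb - 1, by omega⟩
        simp only [innerB]
        rw [show ((L : Nat) : Int) - 1 - j = ((m - 1 : Nat) : Int) by omega,
            show ((k : Int) + 1) - 1 = ((k : Nat) : Int) by ring,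
            combT_eq L (m-1) k (by omega) (by omega)]
        rw [if_neg (by exact_mod_cast Nat.not_le.2 hlt)]
        simp
    · have hge : (m-1).choose k ≤ idx := Nat.not_lt.1 hlt
      have hsplit : m.choose (k+1) = (m-1).choose k + (m-1).choose (k+1) := by
        have hs := Nat.choose_succ_succ' (m-1) k
        rw [show m - 1 + 1 = m by omega] at hs
        exact hs
      have hidx' : idx - (m-1).choose k < (m-1).choose (k+1) := by omega
      have hk1 : k + 1 ≤ m - 1 := by
        by_contra hc
        push_neg at hc
        have := Nat.choose_eq_zero_of_lt (show m - 1 < k + 1 by omega)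
        omega
      obtain ⟨f, rfl⟩ : ∃ f, fa = f + 1 := ⟨fa - 1, by omega⟩
      obtain ⟨g, rfl⟩ : ∃ g, fb = g + 1 := ⟨fb - 1, by omega⟩
      obtain ⟨s', i2, hs', hi2, hA, hB⟩ :=
        IH (m-1) (by omega) k (idx - (m-1).choose k) f g L (j+1) hk1 hidx'
          (by omega) (by omega) (by omega) (by omega)
      refine ⟨s' + 1, i2, by omega, ?_, ?_, ?_⟩
      · rw [show m - 1 - (s' + 1) = m - 1 - 1 - s' by omega]; exact hi2
      · simp only [innerA]
        rw [if_pos (by exact_mod_cast hge)]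
        rw [show (m : Int) - 1 = ((m - 1 : Nat) : Int) by omega,
            divA2 (m-1) k hk1,
            show ((idx : Nat) : Int) - (((m-1).choose k : Nat) : Int)
              = ((idx - (m-1).choose k : Nat) : Int) by omega,
            show ((m - 1 : Nat) : Int) - 1 = ((m : Int) - 1) - 1 by omega]
        have hA' := hA
        rw [show m - 1 - 1 - s' = m - 1 - (s' + 1) by omega] at hA'
        convert hA' using 2 <;> omega
      · simp only [innerB]
        rw [show ((L : Nat) : Int) - 1 - j = ((m - 1 : Nat) : Int) by omega,
            show ((k : Int) + 1) - 1 = ((k : Nat) : Int) by ring,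
            combT_eq L (m-1) k (by omega) (by omega)]
        rw [if_pos (by exact_mod_cast hge)]
        rw [show ((idx : Nat) : Int) - (((m-1).choose k : Nat) : Int)
              = ((idx - (m-1).choose k : Nat) : Int) by omega]
        rw [hB, show j + 1 + (s' : Int) = j + ((s' + 1 : Nat) : Int) by push_cast; ring]

-- joint characterisation of the two outer loops
lemma outer_agree : ∀ (k : Nat), ∀ (m idx : Nat) (pool res : List Int) (j : Int),
    k ≤ m → idx < m.choose k → m ≤ pool.length → j = (pool.length : Int) - (m : Int) →
    outerA k ((m.choose k : Nat) : Int) (m : Int) (k : Int) (idx : Int) pool res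
      = outerB k (factTableB (pool.length : Int)) (pool.length : Int) j (k : Int) (idx : Int)
          pool res := by
  intro k
  induction k with
  | zero => intro m idx pool res j _ _ _ _; simp [outerA, outerB]
  | succ k IH =>
    intro m idx pool res j hk hidx hmL hj
    have hmLI : ((m : Nat) : Int) ≤ ((pool.length : Nat) : Int) := by exact_mod_cast hmL
    simp only [outerA, outerB]
    rw [if_neg (show ¬ (((k+1 : Nat) : Int) = 0) by push_cast; omega),
        if_neg (show ¬ (((k+1 : Nat) : Int) = 0) by push_cast; omega)]
    have ek : ((k+1 : Nat) : Int) = (k : Int) + 1 := by push_cast; ring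
    rw [show (((k+1 : Nat) : Int)) - 1 = ((k : Nat) : Int) by push_cast; ring]
    rw [ek, divA1 m k hk]
    rw [show ((m : Int) - 1).toNat = m - 1 by omega]
    obtain ⟨s, i2, hs, hi2, hA, hB⟩ :=
      inner_agree m k idx (m-1) m pool.length j hk hidx (by omega) (le_refl m) (by omega) (by omega)
    have hsI : ((s : Nat) : Int) + ((k : Nat) : Int) + 1 ≤ ((m : Nat) : Int) := by
      have := hs; push_cast; omega
    rw [show ((pool.length : Int) - j).toNat = m by omega]
    rw [hA, hB]
    have helem : PySem.List.pyGet? pool (-1 - ((m - 1 - s : Nat) : Int))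
        = PySem.List.pyGet? pool (j + (s : Int)) := by
      simp only [PySem.List.pyGet?, PySem.List.pyIdx?]
      rw [if_neg (by omega : ¬ (0 ≤ -1 - ((m - 1 - s : Nat) : Int))),
          if_pos (by omega : -((pool.length : Nat) : Int) ≤ -1 - ((m - 1 - s : Nat) : Int)),
          if_pos (by omega : 0 ≤ j + (s : Int)),
          if_pos (by omega : j + (s : Int) < ((pool.length : Nat) : Int))]
      have hix2 : pool.length - (-(-1 - ((m - 1 - s : Nat) : Int))).toNat
          = (j + (s : Int)).toNat := by omega
      rw [hix2]
    rw [helem]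
    have := IH (m-1-s) i2 pool (res ++ [(PySem.List.pyGet? pool (j + (s : Int))).getD 0])
      (j + (s : Int) + 1) (by omega) hi2 (by omega) (by omega)
    exact this

-- ===== VERDICT (by name: the statement is the Claim_ definition above) =====
theorem nth_combination_spec : Claim_equal_nth_combination := by
  intro iterable r index _hd hpre
  obtain ⟨h0, h1, h2, h3⟩ := hpre
  obtain ⟨rn, rfl⟩ : ∃ rn : Nat, r = (rn : Int) := ⟨r.toNat, by omega⟩
  have hrn : (rn : Int).toNat = rn := by omega
  rw [hrn] at h2 h3
  have hrm : rn ≤ iterable.length := by exact_mod_cast h1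
  simp only [Spec_nth_combination, nth_combination, nth_combination_alt]
  rw [if_neg (by omega : ¬ (((rn : Nat) : Int) < 0 ∨ (iterable.length : Int) < ((rn : Nat) : Int))),
      if_neg (by omega : ¬ (((rn : Nat) : Int) < 0 ∨ (iterable.length : Int) < ((rn : Nat) : Int)))]
  rw [chooseLoopA_eq iterable.length rn hrm, combT_eq iterable.length iterable.length rn (le_refl _) hrm]
  have h01 : 0 ≤ (if index < 0 then index + ((iterable.length.choose rn : Nat) : Int) else index) := by
    split_ifs <;> omega
  have h02 : (if index < 0 then index + ((iterable.length.choose rn : Nat) : Int) else index)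
      < ((iterable.length.choose rn : Nat) : Int) := by
    split_ifs <;> omega
  obtain ⟨ix, hix⟩ : ∃ ix : Nat,
      (if index < 0 then index + ((iterable.length.choose rn : Nat) : Int) else index) = (ix : Int) :=
    ⟨(if index < 0 then index + ((iterable.length.choose rn : Nat) : Int) else index).toNat, by omega⟩
  rw [hix] at h01 h02 ⊢
  rw [if_neg (by omega : ¬ (((ix : Nat) : Int) < 0 ∨ ((iterable.length.choose rn : Nat) : Int) ≤ ((ix : Nat) : Int))),
      if_neg (by omega : ¬ (((ix : Nat) : Int) < 0 ∨ ((iterable.length.choose rn : Nat) : Int) ≤ ((ix : Nat) : Int)))]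
  rw [hrn]
  exact outer_agree rn iterable.length ix iterable [] 0 hrm (by exact_mod_cast h02)
    (le_refl _) (by omega)
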